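-- pv_equiv track=rewrite | github.com/S-W-Leong/E-Com67 | lambda/chat/chat.py | determine_response_type
-- ===== SOURCE A (Python) =====
-- from typing import Dict, List, Any, Optional
--
-- def determine_response_type(tool_results: List[Dict[str, Any]]) -> str:
--     """
--     Determine the response type based on tools used.
--
--     Args:
--         tool_results: List of tool execution results
--
--     Returns:
--         Response type string
--     """
--     if not tool_results:
--         return "info"
--
--     # Check what types of tools were used
--     tool_names = [result.get('tool_name', '') for result in tool_results]
--
--     if any('product_search' in name or 'get_product' in name for name in tool_names):
--         return "product_list"
--     elif any('cart' in name for name in tool_names):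
--         return "cart_update"
--     elif any('order' in name for name in tool_names):
--         return "order_info"
--     elif any('recommendation' in name for name in tool_names):
--         return "recommendation"
--     else:
--         return "info"
-- ===== SOURCE B (Python) =====
-- def _rank(name):
--     if 'product_search' in name or 'get_product' in name:
--         return 0
--     if 'cart' in name:
--         return 1
--     if 'order' in name:
--         return 2
--     if 'recommendation' in name:
--         return 3
--     return 4
--
--
-- def determine_response_type(tool_results):
--     best = 4
--     for result in tool_results:
--         best = min(best, _rank(result.get('tool_name', '')))
--     return ["product_list", "cart_update", "order_info", "recommendation", "info"][best]
-- ===== Notes on version B (the rewrite author's own statement) =====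
-- stated objective: alternative
-- what changed: Replaces A's four separate any() scans over a precomputed name list with a single fold over tool_results maintaining a minimum priority rank, then maps the best rank to the response string via a table.
import Mathlib
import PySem

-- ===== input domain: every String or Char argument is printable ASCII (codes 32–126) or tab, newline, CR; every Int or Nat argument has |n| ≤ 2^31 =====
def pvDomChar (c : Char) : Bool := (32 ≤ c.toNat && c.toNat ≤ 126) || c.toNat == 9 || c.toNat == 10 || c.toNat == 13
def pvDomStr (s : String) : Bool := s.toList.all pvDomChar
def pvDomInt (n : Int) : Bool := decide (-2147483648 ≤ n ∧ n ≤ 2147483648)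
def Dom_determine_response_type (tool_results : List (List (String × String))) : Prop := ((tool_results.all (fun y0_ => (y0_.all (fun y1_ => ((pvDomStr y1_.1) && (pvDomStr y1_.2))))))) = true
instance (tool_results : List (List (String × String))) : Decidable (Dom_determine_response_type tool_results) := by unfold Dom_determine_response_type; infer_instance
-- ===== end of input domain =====

-- B replaces A's four any() scans with one fold tracking the minimum priority rank (alternative decomposition, same cost).

-- ===== PORT A =====
def determine_response_type (tool_results : List (List (String × String))) : String :=
  if tool_results = [] then "info"
  else
    let tool_names := tool_results.map (fun result => (PySem.Dict.mk result).getD "tool_name" "")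
    if tool_names.any (fun name => PySem.Str.isIn "product_search" name || PySem.Str.isIn "get_product" name) then "product_list"
    else if tool_names.any (fun name => PySem.Str.isIn "cart" name) then "cart_update"
    else if tool_names.any (fun name => PySem.Str.isIn "order" name) then "order_info"
    else if tool_names.any (fun name => PySem.Str.isIn "recommendation" name) then "recommendation"
    else "info"

-- ===== PORT B =====
-- B-side helper: priority rank of a tool name (Source B's _rank)
def pvRank (name : String) : Nat :=
  if PySem.Str.isIn "product_search" name || PySem.Str.isIn "get_product" name then 0
  else if PySem.Str.isIn "cart" name then 1
  else if PySem.Str.isIn "order" name then 2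
  else if PySem.Str.isIn "recommendation" name then 3
  else 4

def determine_response_type_alt (tool_results : List (List (String × String))) : String :=
  let best := tool_results.foldl
    (fun b result => min b (pvRank ((PySem.Dict.mk result).getD "tool_name" ""))) 4
  ["product_list", "cart_update", "order_info", "recommendation", "info"].getD best "info"

-- ===== PRECONDITION & SPEC =====
def Spec_determine_response_type (tool_results : List (List (String × String))) (out : String) : Prop := out = determine_response_type_alt tool_results
instance (tool_results : List (List (String × String))) (out : String) : Decidable (Spec_determine_response_type tool_results out) := by unfold Spec_determine_response_type; infer_instance

-- ===== CLAIM (what is proved, stated in full; the proofs are below) =====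
def Claim_equal_determine_response_type : Prop := ∀ (tool_results : List (List (String × String))), Dom_determine_response_type tool_results → Spec_determine_response_type tool_results (determine_response_type tool_results)

-- ===== LEMMAS AND PROOFS =====

-- first-match index of A's if-chain over the whole list
def pvM (tr : List (List (String × String))) : Nat :=
  if tr.any (fun r => PySem.Str.isIn "product_search" ((PySem.Dict.mk r).getD "tool_name" "") || PySem.Str.isIn "get_product" ((PySem.Dict.mk r).getD "tool_name" "")) then 0
  else if tr.any (fun r => PySem.Str.isIn "cart" ((PySem.Dict.mk r).getD "tool_name" "")) then 1
  else if tr.any (fun r => PySem.Str.isIn "order" ((PySem.Dict.mk r).getD "tool_name" "")) then 2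
  else if tr.any (fun r => PySem.Str.isIn "recommendation" ((PySem.Dict.mk r).getD "tool_name" "")) then 3
  else 4

-- purely Boolean shape of "first-match index of (r :: tr) = min (rank r) (first-match index of tr)"
lemma pvChainCons (a b c d ta tb tc td : Bool) :
    (if (a || ta) then 0 else if (b || tb) then 1 else if (c || tc) then 2 else if (d || td) then 3 else 4 : Nat)
      = min (if a then 0 else if b then 1 else if c then 2 else if d then 3 else 4)
            (if ta then 0 else if tb then 1 else if tc then 2 else if td then 3 else 4) := by
  revert a b c d ta tb tc td; decide

-- purely Boolean shape of "A's string chain = table indexed by the first-match index"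
lemma pvChainTable (ta tb tc td : Bool) :
    (if ta then "product_list" else if tb then "cart_update" else if tc then "order_info" else if td then "recommendation" else "info")
      = ["product_list", "cart_update", "order_info", "recommendation", "info"].getD
          (if ta then 0 else if tb then 1 else if tc then 2 else if td then 3 else 4) "info" := by
  revert ta tb tc td; decide

lemma pvM_cons (r : List (String × String)) (tr : List (List (String × String))) :
    pvM (r :: tr) = min (pvRank ((PySem.Dict.mk r).getD "tool_name" "")) (pvM tr) := by
  unfold pvM pvRank
  simp only [List.any_cons]
  exact pvChainCons _ _ _ _ _ _ _ _

lemma pvFold_eq (tr : List (List (String × String))) : ∀ b : Nat, b ≤ 4 →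
    tr.foldl (fun b result => min b (pvRank ((PySem.Dict.mk result).getD "tool_name" ""))) b
      = min b (pvM tr) := by
  induction tr with
  | nil => intro b hb; simp [pvM]; omega
  | cons r tr ih =>
    intro b hb
    have h1 : min b (pvRank ((PySem.Dict.mk r).getD "tool_name" "")) ≤ 4 := by omega
    simp only [List.foldl_cons]
    rw [ih _ h1, pvM_cons]
    omega

lemma pvM_le (tr : List (List (String × String))) : pvM tr ≤ 4 := by
  unfold pvM; split_ifs <;> omega

-- ===== VERDICT (by name: the statement is the Claim_ definition above) =====
theorem determine_response_type_spec : Claim_equal_determine_response_type := by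
  intro tr _
  unfold Spec_determine_response_type determine_response_type determine_response_type_alt
  rw [pvFold_eq tr 4 (le_refl 4)]
  have hmin : min 4 (pvM tr) = pvM tr := by have := pvM_le tr; omega
  rw [hmin]
  by_cases h : tr = []
  · subst h; simp [pvM]
  · simp only [if_neg h]
    unfold pvM
    simp only [List.any_map, Function.comp_def]
    exact pvChainTable _ _ _ _
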